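-- pv_equiv track=rewrite | github.com/holstegelab/short_read_analyzing_pipeline_Snakemake | scripts/compare_bams_side_by_side.py | find_resync3
-- ===== SOURCE A (Python) =====
-- def qname_of(line):
--     i = line.find('\t')
--     return line if i == -1 else line[:i]
--
-- def qname_base_of(line):
--     q = qname_of(line)
--     if len(q) > 2 and q[-2] == '/' and q[-1] in ('1', '2'):
--         return q[:-2]
--     return q
--
-- def find_resync3(a0, a1, a2):
--     n0 = {}
--     n1 = {}
--     n2 = {}
--     for i, l in enumerate(a0):
--         nm = qname_base_of(l)
--         if nm not in n0:
--             n0[nm] = i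
--     for j, l in enumerate(a1):
--         nm = qname_base_of(l)
--         if nm not in n1:
--             n1[nm] = j
--     for k, l in enumerate(a2):
--         nm = qname_base_of(l)
--         if nm not in n2:
--             n2[nm] = k
--     common = set(n0.keys()) & set(n1.keys()) & set(n2.keys())
--     if not common:
--         return None
--     best = None
--     best_key = None
--     for nm in common:
--         i = n0[nm]
--         j = n1[nm]
--         k = n2[nm]
--         key = (max(i, j, k), i + j + k)
--         if best is None or key < best_key:
--             best = (i, j, k, nm)
--             best_key = key
--     return best  # (i, j, k, name)
-- ===== SOURCE B (Python) =====
-- def qname_of(line):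
--     i = line.find('\t')
--     return line if i == -1 else line[:i]
--
-- def qname_base_of(line):
--     q = qname_of(line)
--     if len(q) > 2 and q[-2] == '/' and q[-1] in ('1', '2'):
--         return q[:-2]
--     return q
--
-- def claim_at(s, lst, p):
--     # record position p's qname-base as a first occurrence; report it if new
--     if p < len(lst):
--         nm = qname_base_of(lst[p])
--         if nm not in s:
--             s[nm] = p
--             return nm
--     return None
--
-- def find_resync3(a0, a1, a2):
--     # Frontier sweep: advance position p through all three lists at once; a
--     # name is an answer candidate exactly at the step p == max of its three
--     # first-occurrence indices, so the first step with any completion wins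
--     # (smallest max), and the smallest index sum breaks ties at that step.
--     s0, s1, s2 = {}, {}, {}
--     for p in range(max(len(a0), len(a1), len(a2))):
--         newly = [nm for nm in (claim_at(s0, a0, p), claim_at(s1, a1, p),
--                                claim_at(s2, a2, p)) if nm is not None]
--         done = [(s0[nm] + s1[nm] + s2[nm], s0[nm], s1[nm], s2[nm], nm)
--                 for nm in newly if nm in s0 and nm in s1 and nm in s2]
--         if done:
--             _, i, j, k, nm = min(done, key=lambda t: t[0])
--             return (i, j, k, nm)
--     return None
-- ===== Notes on version B (the rewrite author's own statement) =====
-- stated objective: faster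
-- what changed: B drops A's build-all-three-index-dicts + set-intersection + global min-scan entirely: it sweeps one frontier position p through the three lists simultaneously, recording first-seen names incrementally; a common name completes exactly at the step p equal to the max of its three first indices, so B returns at the first step with any completion (minimal sum of indices as the tie-break there) and stops early.
import Mathlib
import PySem

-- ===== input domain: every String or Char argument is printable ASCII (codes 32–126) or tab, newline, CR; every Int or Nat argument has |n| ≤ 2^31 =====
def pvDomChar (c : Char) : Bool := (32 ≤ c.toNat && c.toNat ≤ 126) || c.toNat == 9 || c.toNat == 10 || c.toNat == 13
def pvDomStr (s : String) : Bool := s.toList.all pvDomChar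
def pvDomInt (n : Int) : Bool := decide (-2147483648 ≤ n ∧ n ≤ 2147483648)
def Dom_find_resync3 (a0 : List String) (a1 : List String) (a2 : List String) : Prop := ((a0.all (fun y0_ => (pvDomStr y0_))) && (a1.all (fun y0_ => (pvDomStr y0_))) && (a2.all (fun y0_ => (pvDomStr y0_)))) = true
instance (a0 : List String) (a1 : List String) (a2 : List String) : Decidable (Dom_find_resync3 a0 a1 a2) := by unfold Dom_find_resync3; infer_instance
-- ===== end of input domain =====

-- B replaces A's three full first-occurrence dicts + set intersection + global min-scan by a
-- single frontier sweep over positions that records first-seen names incrementally and returns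
-- at the first position where some name completes (then smallest index sum); equivalence is
-- claimed on inputs without (max,sum) key ties between distinct names, where A's tie-break
-- depends on set-iteration (hash) order.

-- ===== PORT A =====
-- shared helpers: identical source in Source A and Source B
def qname_of (line : String) : String :=
  let i := PySem.Str.find line "\t"
  if i = -1 then line else PySem.Str.slice line none (some i)

def qname_base_of (line : String) : String :=
  let q := qname_of line
  if 2 < PySem.Str.len q ∧ PySem.Str.pyGet? q (-2) = some '/' ∧
      (PySem.Str.pyGet? q (-1) = some '1' ∨ PySem.Str.pyGet? q (-1) = some '2') then
    PySem.Str.slice q none (some (-2))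
  else q

def find_resync3 (a0 : List String) (a1 : List String) (a2 : List String) :
    Option (Int × Int × Int × String) :=
  let n0 : PySem.Dict String Int := (PySem.List.enumerate a0).foldl
    (fun d p => let nm := qname_base_of p.2; if d.contains nm then d else d.insert nm p.1)
    PySem.Dict.empty
  let n1 : PySem.Dict String Int := (PySem.List.enumerate a1).foldl
    (fun d p => let nm := qname_base_of p.2; if d.contains nm then d else d.insert nm p.1)
    PySem.Dict.empty
  let n2 : PySem.Dict String Int := (PySem.List.enumerate a2).foldl
    (fun d p => let nm := qname_base_of p.2; if d.contains nm then d else d.insert nm p.1)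
    PySem.Dict.empty
  let common : PySem.Set String :=
    PySem.Set.inter (PySem.Set.inter (PySem.Set.ofList n0.keys) (PySem.Set.ofList n1.keys))
      (PySem.Set.ofList n2.keys)
  if common = [] then none
  else
    -- n0[nm] etc. never raise on nm ∈ common ⊆ keys; getD is the total form of that lookup.
    -- Python compares the (max, sum) key tuples lexicographically; written out below.
    let best := common.foldl (fun acc nm =>
      let i := n0.getD nm 0
      let j := n1.getD nm 0
      let k := n2.getD nm 0
      let key : Int × Int := (max i (max j k), i + j + k)
      match acc with
      | none => some ((i, j, k, nm), key)
      | some (b, bk) =>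
          if key.1 < bk.1 ∨ (key.1 = bk.1 ∧ key.2 < bk.2) then some ((i, j, k, nm), key)
          else some (b, bk)) none
    match best with
    | none => none
    | some (b, _) => some b

-- ===== PORT B =====
-- record position p's qname-base as a first occurrence; report it if new.
-- p comes from range(..) so 0 ≤ p; with p < len, pyGetD is exactly lst[p].
def claim_at (s : PySem.Dict String Int) (lst : List String) (p : Int) :
    PySem.Dict String Int × Option String :=
  if p < (lst.length : Int) then
    let nm := qname_base_of (PySem.List.pyGetD lst p "")
    if s.contains nm then (s, none) else (s.insert nm p, some nm)
  else (s, none)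

-- the frontier sweep: early 'return' becomes the recursion stopping
def sweep (a0 a1 a2 : List String) (ps : List Int)
    (s0 s1 s2 : PySem.Dict String Int) : Option (Int × Int × Int × String) :=
  match ps with
  | [] => none
  | p :: rest =>
    let r0 := claim_at s0 a0 p
    let r1 := claim_at s1 a1 p
    let r2 := claim_at s2 a2 p
    let newly := [r0.2, r1.2, r2.2].filterMap id
    -- s0[nm] etc. never raise after the 'nm in s0 and …' test; getD is the total lookup
    let done := (newly.filter
        (fun nm => r0.1.contains nm && r1.1.contains nm && r2.1.contains nm)).map
      (fun nm => (r0.1.getD nm 0 + r1.1.getD nm 0 + r2.1.getD nm 0,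
                  r0.1.getD nm 0, r1.1.getD nm 0, r2.1.getD nm 0, nm))
    if done = [] then sweep a0 a1 a2 rest r0.1 r1.1 r2.1
    else
      match PySem.List.min? done (fun t => t.1) with
      | some (_, i, j, k, nm) => some (i, j, k, nm)
      | none => none

def find_resync3_alt (a0 : List String) (a1 : List String) (a2 : List String) :
    Option (Int × Int × Int × String) :=
  sweep a0 a1 a2
    (PySem.List.pyRange 0 (max (a0.length : Int) (max (a1.length : Int) (a2.length : Int))) 1)
    PySem.Dict.empty PySem.Dict.empty PySem.Dict.empty

-- ===== PRECONDITION & SPEC =====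
-- first occurrence index of qname-base nm in xs, counting from s
def firstIdx? (xs : List String) (s : Int) (nm : String) : Option Int :=
  match xs with
  | [] => none
  | l :: t => if qname_base_of l = nm then some s else firstIdx? t (s + 1) nm

-- the (max, sum) selection key of a name, defined iff the name occurs in all three lists
def pvKey (a0 a1 a2 : List String) (nm : String) : Option (Int × Int) :=
  match firstIdx? a0 0 nm, firstIdx? a1 0 nm, firstIdx? a2 0 nm with
  | some i, some j, some k => some (max i (max j k), i + j + k)
  | _, _, _ => none

-- Pre_ excludes inputs on which two DISTINCT common names tie on the (max, sum) key: there A's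
-- choice between them follows Python's hash-randomized set-iteration order, so either value is
-- accidental; B deterministically picks the completing name with the smallest index in a0.
def Pre_find_resync3 (a0 : List String) (a1 : List String) (a2 : List String) : Prop :=
  ∀ l ∈ a0, ∀ l' ∈ a0, qname_base_of l ≠ qname_base_of l' →
    pvKey a0 a1 a2 (qname_base_of l) = pvKey a0 a1 a2 (qname_base_of l') →
    pvKey a0 a1 a2 (qname_base_of l) = none
instance (a0 : List String) (a1 : List String) (a2 : List String) :
    Decidable (Pre_find_resync3 a0 a1 a2) := by unfold Pre_find_resync3; infer_instance

def pvWitness_find_resync3 : List String × List String × List String :=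
  (["r1", "r2"], ["r2", "r1"], ["r1"])

def Spec_find_resync3 (a0 : List String) (a1 : List String) (a2 : List String)
    (out : Option (Int × Int × Int × String)) : Prop := out = find_resync3_alt a0 a1 a2
instance (a0 : List String) (a1 : List String) (a2 : List String)
    (out : Option (Int × Int × Int × String)) : Decidable (Spec_find_resync3 a0 a1 a2 out) := by
  unfold Spec_find_resync3; infer_instance

-- ===== CLAIM (what is proved, stated in full; the proofs are below) =====
def Claim_equal_find_resync3 : Prop := ∀ (a0 : List String) (a1 : List String) (a2 : List String), Dom_find_resync3 a0 a1 a2 → Pre_find_resync3 a0 a1 a2 → Spec_find_resync3 a0 a1 a2 (find_resync3 a0 a1 a2)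

-- ===== LEMMAS AND PROOFS =====

-- proof-side restatement of A's port (definitionally equal; proved by rfl below)

def dictA (xs : List String) : PySem.Dict String Int :=
  (PySem.List.enumerate xs).foldl
    (fun d p => let nm := qname_base_of p.2; if d.contains nm then d else d.insert nm p.1)
    PySem.Dict.empty

def commonA (a0 a1 a2 : List String) : PySem.Set String :=
  PySem.Set.inter (PySem.Set.inter (PySem.Set.ofList (dictA a0).keys)
    (PySem.Set.ofList (dictA a1).keys)) (PySem.Set.ofList (dictA a2).keys)

def gvA (a0 a1 a2 : List String) (nm : String) : Int × Int × Int × String :=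
  ((dictA a0).getD nm 0, (dictA a1).getD nm 0, (dictA a2).getD nm 0, nm)

def gkA (a0 a1 a2 : List String) (nm : String) : Int × Int :=
  (max ((dictA a0).getD nm 0) (max ((dictA a1).getD nm 0) ((dictA a2).getD nm 0)),
   (dictA a0).getD nm 0 + (dictA a1).getD nm 0 + (dictA a2).getD nm 0)

def stepScan (a0 a1 a2 : List String)
    (acc : Option ((Int × Int × Int × String) × (Int × Int))) (nm : String) :
    Option ((Int × Int × Int × String) × (Int × Int)) :=
  match acc with
  | none => some (gvA a0 a1 a2 nm, gkA a0 a1 a2 nm)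
  | some (b, bk) =>
      if (gkA a0 a1 a2 nm).1 < bk.1 ∨ ((gkA a0 a1 a2 nm).1 = bk.1 ∧ (gkA a0 a1 a2 nm).2 < bk.2)
      then some (gvA a0 a1 a2 nm, gkA a0 a1 a2 nm) else some (b, bk)

theorem A_eq (a0 a1 a2 : List String) :
    find_resync3 a0 a1 a2 =
      (if commonA a0 a1 a2 = [] then none
       else match (commonA a0 a1 a2).foldl (stepScan a0 a1 a2) none with
         | none => none
         | some (b, _) => some b) := rfl

def k1fn (c : Int × Int × Int × String) : Int := max c.1 (max c.2.1 c.2.2.1)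
def k2fn (c : Int × Int × Int × String) : Int := c.1 + c.2.1 + c.2.2.1

-- the value both programs associate with a common name
def val? (a0 a1 a2 : List String) (nm : String) : Option (Int × Int × Int × String) :=
  match firstIdx? a0 0 nm, firstIdx? a1 0 nm, firstIdx? a2 0 nm with
  | some i, some j, some k => some (i, j, k, nm)
  | _, _, _ => none

-- ---- Python's lexicographic order on the (max, sum) key pairs ----

def lexlt (p q : Int × Int) : Prop := p.1 < q.1 ∨ (p.1 = q.1 ∧ p.2 < q.2)

theorem lexlt_irrefl (p : Int × Int) : ¬ lexlt p p := by simp [lexlt]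

theorem lexlt_trans {p q r : Int × Int} (h1 : lexlt p q) (h2 : lexlt q r) : lexlt p r := by
  obtain ⟨a, b⟩ := p; obtain ⟨c, d⟩ := q; obtain ⟨e, f⟩ := r
  have h1' : a < c ∨ (a = c ∧ b < d) := h1
  have h2' : c < e ∨ (c = e ∧ d < f) := h2
  exact (show a < e ∨ (a = e ∧ b < f) by omega)

theorem lexlt_resolve {p q r : Int × Int} (h1 : ¬ lexlt p q) (h2 : lexlt p r) : lexlt q r := by
  obtain ⟨a, b⟩ := p; obtain ⟨c, d⟩ := q; obtain ⟨e, f⟩ := r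
  have h1' : ¬ (a < c ∨ (a = c ∧ b < d)) := h1
  have h2' : a < e ∨ (a = e ∧ b < f) := h2
  exact (show c < e ∨ (c = e ∧ d < f) by omega)

theorem lexlt_antisymm {p q : Int × Int} (h1 : ¬ lexlt p q) (h2 : ¬ lexlt q p) : p = q := by
  obtain ⟨a, b⟩ := p; obtain ⟨c, d⟩ := q
  have h1' : ¬ (a < c ∨ (a = c ∧ b < d)) := h1
  have h2' : ¬ (c < a ∨ (c = a ∧ d < b)) := h2
  have hac : a = c ∧ b = d := by omega
  rw [hac.1, hac.2]

-- ---- A's first-occurrence dictionaries ----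

theorem getA (nm : String) (xs : List String) (s : Int) (d : PySem.Dict String Int) :
    ((PySem.List.enumerate xs s).foldl
      (fun d p => let nm := qname_base_of p.2; if d.contains nm then d else d.insert nm p.1)
      d).get? nm = (d.get? nm).or (firstIdx? xs s nm) := by
  induction xs generalizing s d with
  | nil => simp [PySem.List.enumerate, firstIdx?]
  | cons l t ih =>
    simp only [PySem.List.enumerate, List.foldl_cons]
    rw [ih, firstIdx?]
    by_cases h : qname_base_of l = nm
    · simp only [h]
      by_cases hc : d.contains nm
      · have hs : (d.get? nm).isSome := by rw [← PySem.Dict.contains_eq_isSome_get?, hc]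
        obtain ⟨v, hv⟩ := Option.isSome_iff_exists.mp hs
        simp [hc, hv]
      · have hn : d.get? nm = none := by
          cases he : d.get? nm with
          | none => rfl
          | some v => rw [PySem.Dict.contains_eq_isSome_get?, he] at hc; simp at hc
        simp [hc, hn, PySem.Dict.get?_insert_self]
    · have hne : nm ≠ qname_base_of l := fun he => h he.symm
      simp only [if_neg h]
      by_cases hc : d.contains (qname_base_of l)
      · simp [hc]
      · simp only [hc, Bool.false_eq_true, if_false]
        rw [PySem.Dict.get?_insert_of_ne d s hne]

theorem dictA_get? (xs : List String) (nm : String) :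
    (dictA xs).get? nm = firstIdx? xs 0 nm := by
  unfold dictA
  rw [getA, PySem.Dict.get?_empty, Option.none_or]

-- ---- basic facts about firstIdx? ----

theorem firstIdx?_bounds (xs : List String) (s : Int) (nm : String) (i : Int)
    (h : firstIdx? xs s nm = some i) : s ≤ i ∧ i < s + xs.length := by
  induction xs generalizing s with
  | nil => simp [firstIdx?] at h
  | cons l t ih =>
    rw [firstIdx?] at h
    by_cases he : qname_base_of l = nm
    · rw [if_pos he] at h
      have hsi : s = i := Option.some_inj.mp h
      simp only [List.length_cons]
      push_cast
      omega
    · rw [if_neg he] at h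
      have := ih (s + 1) h
      simp only [List.length_cons]
      push_cast
      omega

theorem firstIdx?_append (u v : List String) (s : Int) (nm : String) :
    firstIdx? (u ++ v) s nm = (firstIdx? u s nm).or (firstIdx? v (s + u.length) nm) := by
  induction u generalizing s with
  | nil => simp [firstIdx?]
  | cons l t ih =>
    simp only [List.cons_append, firstIdx?]
    by_cases he : qname_base_of l = nm
    · simp [he]
    · rw [if_neg he, if_neg he, ih]
      simp only [List.length_cons]
      push_cast
      ring_nf

theorem firstIdx?_take (xs : List String) (m : Nat) (s : Int) (nm : String) :
    firstIdx? (xs.take m) s nm =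
      match firstIdx? xs s nm with
      | some i => if i < s + m then some i else none
      | none => none := by
  induction xs generalizing m s with
  | nil => simp [firstIdx?]
  | cons l t ih =>
    cases m with
    | zero =>
      rw [List.take_zero]
      cases hf : firstIdx? (l :: t) s nm with
      | none => rfl
      | some i =>
        have hb := firstIdx?_bounds (l :: t) s nm i hf
        have hni : ¬ (i < s + ((0 : Nat) : Int)) := by push_cast; omega
        show (none : Option Int) = if i < s + ((0 : Nat) : Int) then some i else none
        rw [if_neg hni]
    | succ m' =>
      simp only [List.take_succ_cons, firstIdx?]
      by_cases he : qname_base_of l = nm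
      · rw [if_pos he, if_pos he]
        have hlt : s < s + ((m' + 1 : Nat) : Int) := by push_cast; omega
        show some s = if s < s + ((m' + 1 : Nat) : Int) then some s else none
        rw [if_pos hlt]
      · rw [if_neg he, if_neg he, ih]
        cases hf : firstIdx? t (s + 1) nm with
        | none => rfl
        | some i =>
          have h1 : (i < s + 1 + (m' : Int)) ↔ (i < s + ((m' + 1 : Nat) : Int)) := by
            push_cast; omega
          show (if i < s + 1 + (m' : Int) then some i else none)
            = if i < s + ((m' + 1 : Nat) : Int) then some i else none
          by_cases hi : i < s + 1 + (m' : Int)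
          · rw [if_pos hi, if_pos (h1.mp hi)]
          · rw [if_neg hi, if_neg (fun hh => hi (h1.mpr hh))]


theorem firstIdx?_take_of_some (xs : List String) (m : Nat) (s : Int) (nm : String) (i : Int)
    (hf : firstIdx? xs s nm = some i) :
    firstIdx? (xs.take m) s nm = if i < s + (m : Int) then some i else none := by
  rw [firstIdx?_take, hf]

theorem firstIdx?_take_of_none (xs : List String) (m : Nat) (s : Int) (nm : String)
    (hf : firstIdx? xs s nm = none) : firstIdx? (xs.take m) s nm = none := by
  rw [firstIdx?_take, hf]

theorem firstIdx?_occurs (xs : List String) (s : Int) (nm : String)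
    (h : (firstIdx? xs s nm).isSome) : ∃ l ∈ xs, qname_base_of l = nm := by
  induction xs generalizing s with
  | nil => simp [firstIdx?] at h
  | cons l t ih =>
    rw [firstIdx?] at h
    by_cases he : qname_base_of l = nm
    · exact ⟨l, List.mem_cons_self, he⟩
    · rw [if_neg he] at h
      obtain ⟨l', hl', hb⟩ := ih (s + 1) h
      exact ⟨l', List.mem_cons_of_mem _ hl', hb⟩

-- ---- one step of the sweep: claim_at advances the truncated first-occurrence dict ----

-- the name claim_at reports at position p, expressed over the input alone
def newAt (xs : List String) (p : Nat) : Option String :=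
  if h : p < xs.length then
    if (firstIdx? (xs.take p) 0 (qname_base_of xs[p])).isSome then none
    else some (qname_base_of xs[p])
  else none

theorem dictA_take_succ (xs : List String) (p : Nat) (h : p < xs.length) :
    dictA (xs.take (p + 1)) =
      (if (dictA (xs.take p)).contains (qname_base_of xs[p]) then dictA (xs.take p)
       else (dictA (xs.take p)).insert (qname_base_of xs[p]) (p : Int)) := by
  have ht : xs.take (p + 1) = xs.take p ++ [xs[p]] := by
    rw [List.take_add_one, List.getElem?_eq_getElem h]
    rfl
  have hlen : (xs.take p).length = p := by
    rw [List.length_take]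
    omega
  unfold dictA
  rw [ht, PySem.List.enumerate_append, List.foldl_append, hlen]
  simp [PySem.List.enumerate]

theorem dictA_take_stable (xs : List String) (p : Nat) (h : ¬ p < xs.length) :
    dictA (xs.take (p + 1)) = dictA (xs.take p) := by
  rw [List.take_of_length_le (by omega), List.take_of_length_le (by omega)]

theorem claim_at_eq (xs : List String) (p : Nat) :
    claim_at (dictA (xs.take p)) xs (p : Int) = (dictA (xs.take (p + 1)), newAt xs p) := by
  unfold claim_at newAt
  by_cases h : p < xs.length
  · have hlt : (p : Int) < (xs.length : Int) := by exact_mod_cast h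
    rw [if_pos hlt, dif_pos h]
    have hg : PySem.List.pyGetD xs (p : Int) "" = xs[p] := by
      rw [PySem.List.pyGetD_natCast]
      exact List.getD_eq_getElem _ _ h
    rw [hg]
    have hcon : (dictA (xs.take p)).contains (qname_base_of xs[p])
        = (firstIdx? (xs.take p) 0 (qname_base_of xs[p])).isSome := by
      rw [PySem.Dict.contains_eq_isSome_get?, dictA_get?]
    rw [dictA_take_succ xs p h]
    by_cases hc : (dictA (xs.take p)).contains (qname_base_of xs[p]) = true
    · have hs : (firstIdx? (xs.take p) 0 (qname_base_of xs[p])).isSome = true := by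
        rw [← hcon]; exact hc
      simp [hc, hs]
    · have hs : (firstIdx? (xs.take p) 0 (qname_base_of xs[p])).isSome = false := by
        rw [← hcon]; simpa using hc
      simp [hc, hs]
  · have hlt : ¬ ((p : Int) < (xs.length : Int)) := by exact_mod_cast h
    rw [if_neg hlt, dif_neg h, dictA_take_stable xs p h]

theorem newAt_eq_some_iff (xs : List String) (p : Nat) (nm : String) :
    newAt xs p = some nm ↔ firstIdx? xs 0 nm = some (p : Int) := by
  unfold newAt
  by_cases h : p < xs.length
  · rw [dif_pos h]
    have ht : xs.take (p + 1) = xs.take p ++ [xs[p]] := by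
      rw [List.take_add_one, List.getElem?_eq_getElem h]; rfl
    have hlen : ((xs.take p).length : Int) = (p : Int) := by
      rw [List.length_take]; push_cast; omega
    constructor
    · intro he
      by_cases hs : (firstIdx? (xs.take p) 0 (qname_base_of xs[p])).isSome
      · rw [if_pos hs] at he; exact absurd he (by simp)
      · rw [if_neg hs] at he
        have hnm : qname_base_of xs[p] = nm := Option.some_inj.mp he
        have hnone : firstIdx? (xs.take p) 0 nm = none := by
          rw [← hnm]
          cases hf : firstIdx? (xs.take p) 0 (qname_base_of xs[p]) with
          | none => rfl
          | some i => rw [hf] at hs; simp at hs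
        have hone : firstIdx? [xs[p]] (0 + ((xs.take p).length : Int)) nm
            = some (p : Int) := by
          rw [hlen]
          show (if qname_base_of xs[p] = nm then some (0 + (p : Int))
            else firstIdx? ([] : List String) (0 + (p : Int) + 1) nm) = some (p : Int)
          rw [if_pos hnm]
          norm_num
        have htk : firstIdx? (xs.take (p + 1)) 0 nm = some (p : Int) := by
          rw [ht, firstIdx?_append, hnone, Option.none_or, hone]
        cases hf : firstIdx? xs 0 nm with
        | none =>
          rw [firstIdx?_take_of_none xs (p + 1) 0 nm hf] at htk
          exact absurd htk (by simp)
        | some i =>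
          rw [firstIdx?_take_of_some xs (p + 1) 0 nm i hf] at htk
          by_cases hi : i < 0 + ((p + 1 : Nat) : Int)
          · rw [if_pos hi] at htk; exact htk
          · rw [if_neg hi] at htk; exact absurd htk (by simp)
    · intro hf
      have htk : firstIdx? (xs.take (p + 1)) 0 nm = some (p : Int) := by
        rw [firstIdx?_take_of_some xs (p + 1) 0 nm _ hf, if_pos (by push_cast; omega)]
      rw [ht, firstIdx?_append] at htk
      have hnone : firstIdx? (xs.take p) 0 nm = none := by
        cases hg : firstIdx? (xs.take p) 0 nm with
        | none => rfl
        | some i =>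
          have hb := firstIdx?_bounds _ _ _ _ hg
          have hlen2 : ((xs.take p).length : Int) ≤ (p : Int) := by
            rw [List.length_take]; push_cast; omega
          rw [hg] at htk
          have hip : i = (p : Int) := Option.some_inj.mp htk
          omega
      rw [hnone, Option.none_or, hlen] at htk
      have hnm : qname_base_of xs[p] = nm := by
        by_contra hne
        rw [show firstIdx? [xs[p]] (0 + (p : Int)) nm = none by
          show (if qname_base_of xs[p] = nm then some (0 + (p : Int))
            else firstIdx? ([] : List String) (0 + (p : Int) + 1) nm) = none
          rw [if_neg hne]; rfl] at htk
        exact absurd htk (by simp)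
      have hns : ¬ (firstIdx? (xs.take p) 0 (qname_base_of xs[p])).isSome = true := by
        rw [hnm, hnone]; simp
      rw [if_neg hns, hnm]
  · rw [dif_neg h]
    constructor
    · intro he; exact absurd he (by simp)
    · intro hf
      have hb := firstIdx?_bounds _ _ _ _ hf
      simp at hb
      omega

-- membership in dictA of a truncation, and the stored value
theorem dictA_take_get? (xs : List String) (m : Nat) (nm : String) :
    (dictA (xs.take m)).get? nm = firstIdx? (xs.take m) 0 nm := dictA_get? _ _

theorem contains_dictA_take (xs : List String) (m : Nat) (nm : String) :
    (dictA (xs.take m)).contains nm = true ↔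
      ∃ i, firstIdx? xs 0 nm = some i ∧ i < (m : Int) := by
  rw [PySem.Dict.contains_eq_isSome_get?, dictA_take_get?]
  cases hf : firstIdx? xs 0 nm with
  | none =>
    rw [firstIdx?_take_of_none xs m 0 nm hf]
    simp
  | some i =>
    rw [firstIdx?_take_of_some xs m 0 nm i hf]
    by_cases hi : i < 0 + (m : Int)
    · rw [if_pos hi]
      constructor
      · intro _; exact ⟨i, rfl, by omega⟩
      · intro _; rfl
    · rw [if_neg hi]
      constructor
      · intro hh; exact absurd hh (by simp)
      · rintro ⟨j, hj, hjm⟩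
        have : j = i := (Option.some_inj.mp hj).symm
        omega

theorem getD_dictA_take (xs : List String) (m : Nat) (nm : String) (i : Int)
    (hf : firstIdx? xs 0 nm = some i) (hi : i < (m : Int)) :
    (dictA (xs.take m)).getD nm 0 = i := by
  rw [PySem.Dict.getD_eq_get?_getD, dictA_take_get?,
    firstIdx?_take_of_some xs m 0 nm i hf, if_pos (by omega)]
  rfl

-- ---- the completions found at sweep position p, over the input alone ----

def doneAt (a0 a1 a2 : List String) (p : Nat) : List (Int × Int × Int × Int × String) :=
  (([newAt a0 p, newAt a1 p, newAt a2 p].filterMap id).filter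
      (fun nm => (dictA (a0.take (p + 1))).contains nm && (dictA (a1.take (p + 1))).contains nm
        && (dictA (a2.take (p + 1))).contains nm)).map
    (fun nm => ((dictA (a0.take (p + 1))).getD nm 0 + (dictA (a1.take (p + 1))).getD nm 0
        + (dictA (a2.take (p + 1))).getD nm 0,
      (dictA (a0.take (p + 1))).getD nm 0, (dictA (a1.take (p + 1))).getD nm 0,
      (dictA (a2.take (p + 1))).getD nm 0, nm))

theorem sweep_cons (a0 a1 a2 : List String) (p : Nat) (rest : List Int) :
    sweep a0 a1 a2 ((p : Int) :: rest)
      (dictA (a0.take p)) (dictA (a1.take p)) (dictA (a2.take p)) =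
      (if doneAt a0 a1 a2 p = [] then
        sweep a0 a1 a2 rest (dictA (a0.take (p + 1))) (dictA (a1.take (p + 1)))
          (dictA (a2.take (p + 1)))
       else
        match PySem.List.min? (doneAt a0 a1 a2 p) (fun t => t.1) with
        | some (_, i, j, k, nm) => some (i, j, k, nm)
        | none => none) := by
  simp only [sweep, claim_at_eq, doneAt]

theorem mem_doneAt_iff (a0 a1 a2 : List String) (p : Nat)
    (t : Int × Int × Int × Int × String) :
    t ∈ doneAt a0 a1 a2 p ↔
      ∃ nm i j k, firstIdx? a0 0 nm = some i ∧ firstIdx? a1 0 nm = some j ∧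
        firstIdx? a2 0 nm = some k ∧ max i (max j k) = (p : Int) ∧
        t = (i + j + k, i, j, k, nm) := by
  unfold doneAt
  rw [List.mem_map]
  constructor
  · rintro ⟨nm, hnm, rfl⟩
    rw [List.mem_filter] at hnm
    obtain ⟨hnew, hcon⟩ := hnm
    simp only [Bool.and_eq_true] at hcon
    obtain ⟨⟨hc0, hc1⟩, hc2⟩ := hcon
    obtain ⟨i, hi, hip⟩ := (contains_dictA_take a0 (p + 1) nm).mp hc0
    obtain ⟨j, hj, hjp⟩ := (contains_dictA_take a1 (p + 1) nm).mp hc1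
    obtain ⟨k, hk, hkp⟩ := (contains_dictA_take a2 (p + 1) nm).mp hc2
    rw [List.mem_filterMap] at hnew
    obtain ⟨o, ho, hid⟩ := hnew
    have hmax : max i (max j k) = (p : Int) := by
      have hone : firstIdx? a0 0 nm = some (p : Int) ∨ firstIdx? a1 0 nm = some (p : Int)
          ∨ firstIdx? a2 0 nm = some (p : Int) := by
        simp only [List.mem_cons, List.not_mem_nil, or_false] at ho
        rcases ho with rfl | rfl | rfl
        · exact Or.inl ((newAt_eq_some_iff a0 p nm).mp hid)
        · exact Or.inr (Or.inl ((newAt_eq_some_iff a1 p nm).mp hid))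
        · exact Or.inr (Or.inr ((newAt_eq_some_iff a2 p nm).mp hid))
      push_cast at hip hjp hkp
      rcases hone with h | h | h
      · have : i = (p : Int) := Option.some_inj.mp (hi.symm.trans h); omega
      · have : j = (p : Int) := Option.some_inj.mp (hj.symm.trans h); omega
      · have : k = (p : Int) := Option.some_inj.mp (hk.symm.trans h); omega
    refine ⟨nm, i, j, k, hi, hj, hk, hmax, ?_⟩
    rw [getD_dictA_take a0 (p + 1) nm i hi hip, getD_dictA_take a1 (p + 1) nm j hj hjp,
      getD_dictA_take a2 (p + 1) nm k hk hkp]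
  · rintro ⟨nm, i, j, k, hi, hj, hk, hmax, rfl⟩
    have hb0 := firstIdx?_bounds _ _ _ _ hi
    have hb1 := firstIdx?_bounds _ _ _ _ hj
    have hb2 := firstIdx?_bounds _ _ _ _ hk
    have hip : i < ((p + 1 : Nat) : Int) := by push_cast; omega
    have hjp : j < ((p + 1 : Nat) : Int) := by push_cast; omega
    have hkp : k < ((p + 1 : Nat) : Int) := by push_cast; omega
    refine ⟨nm, ?_, ?_⟩
    · rw [List.mem_filter]
      constructor
      · rw [List.mem_filterMap]
        have hone : i = (p : Int) ∨ j = (p : Int) ∨ k = (p : Int) := by omega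
        rcases hone with h | h | h
        · exact ⟨newAt a0 p, by simp, by
            rw [show newAt a0 p = some nm from (newAt_eq_some_iff a0 p nm).mpr (h ▸ hi)]; rfl⟩
        · exact ⟨newAt a1 p, by simp, by
            rw [show newAt a1 p = some nm from (newAt_eq_some_iff a1 p nm).mpr (h ▸ hj)]; rfl⟩
        · exact ⟨newAt a2 p, by simp, by
            rw [show newAt a2 p = some nm from (newAt_eq_some_iff a2 p nm).mpr (h ▸ hk)]; rfl⟩
      · simp only [Bool.and_eq_true]
        exact ⟨⟨(contains_dictA_take a0 (p + 1) nm).mpr ⟨i, hi, hip⟩,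
          (contains_dictA_take a1 (p + 1) nm).mpr ⟨j, hj, hjp⟩⟩,
          (contains_dictA_take a2 (p + 1) nm).mpr ⟨k, hk, hkp⟩⟩
    · rw [getD_dictA_take a0 (p + 1) nm i hi hip, getD_dictA_take a1 (p + 1) nm j hj hjp,
        getD_dictA_take a2 (p + 1) nm k hk hkp]

-- the sweep's range bound
def Nval (a0 a1 a2 : List String) : Int :=
  max (a0.length : Int) (max (a1.length : Int) (a2.length : Int))

theorem pvKey_bounds (a0 a1 a2 : List String) (nm : String) (kk : Int × Int)
    (h : pvKey a0 a1 a2 nm = some kk) : 0 ≤ kk.1 ∧ kk.1 < Nval a0 a1 a2 := by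
  unfold pvKey at h
  cases h0 : firstIdx? a0 0 nm with
  | none => rw [h0] at h; simp at h
  | some i =>
    cases h1 : firstIdx? a1 0 nm with
    | none => rw [h0, h1] at h; simp at h
    | some j =>
      cases h2 : firstIdx? a2 0 nm with
      | none => rw [h0, h1, h2] at h; simp at h
      | some k =>
        rw [h0, h1, h2] at h
        have hb0 := firstIdx?_bounds _ _ _ _ h0
        have hb1 := firstIdx?_bounds _ _ _ _ h1
        have hb2 := firstIdx?_bounds _ _ _ _ h2
        have : kk = (max i (max j k), i + j + k) := (Option.some_inj.mp h).symm
        subst this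
        unfold Nval
        constructor <;> simp <;> omega

-- the main induction: the sweep from position p (no completion strictly below p) returns
-- none iff no common name, and otherwise a key-minimal candidate
theorem sweep_go (a0 a1 a2 : List String) :
    ∀ (q : Nat) (p : Nat), (p : Int) + (q : Int) = Nval a0 a1 a2 →
      (∀ nm kk, pvKey a0 a1 a2 nm = some kk → (p : Int) ≤ kk.1) →
      ((sweep a0 a1 a2 (PySem.List.pyRange p (Nval a0 a1 a2) 1)
          (dictA (a0.take p)) (dictA (a1.take p)) (dictA (a2.take p)) = none →
        ∀ nm, pvKey a0 a1 a2 nm = none) ∧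
       (∀ c, sweep a0 a1 a2 (PySem.List.pyRange p (Nval a0 a1 a2) 1)
          (dictA (a0.take p)) (dictA (a1.take p)) (dictA (a2.take p)) = some c →
        ∃ nm, val? a0 a1 a2 nm = some c ∧
          ∀ nm' kk', pvKey a0 a1 a2 nm' = some kk' → ¬ lexlt kk' (k1fn c, k2fn c))) := by
  intro q
  induction q with
  | zero =>
    intro p hpq hlow
    have hpn : (p : Int) = Nval a0 a1 a2 := by push_cast at hpq; omega
    rw [PySem.List.pyRange_one_eq_nil (by omega)]
    constructor
    · intro _ nm
      cases hk : pvKey a0 a1 a2 nm with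
      | none => rfl
      | some kk =>
        have h1 := hlow nm kk hk
        have h2 := (pvKey_bounds a0 a1 a2 nm kk hk).2
        omega
    · intro c hc
      exact absurd hc (by simp [sweep])
  | succ q' ih =>
    intro p hpq hlow
    have hpn : (p : Int) < Nval a0 a1 a2 := by push_cast at hpq ⊢; omega
    rw [PySem.List.pyRange_one_cons hpn, sweep_cons]
    by_cases hd : doneAt a0 a1 a2 p = []
    · rw [if_pos hd]
      have hlow' : ∀ nm kk, pvKey a0 a1 a2 nm = some kk → ((p + 1 : Nat) : Int) ≤ kk.1 := by
        intro nm kk hk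
        have h1 := hlow nm kk hk
        have : kk.1 ≠ (p : Int) := by
          intro hkp
          unfold pvKey at hk
          cases h0 : firstIdx? a0 0 nm with
          | none => rw [h0] at hk; simp at hk
          | some i =>
            cases h1' : firstIdx? a1 0 nm with
            | none => rw [h0, h1'] at hk; simp at hk
            | some j =>
              cases h2 : firstIdx? a2 0 nm with
              | none => rw [h0, h1', h2] at hk; simp at hk
              | some k =>
                rw [h0, h1', h2] at hk
                have hkk : kk = (max i (max j k), i + j + k) := (Option.some_inj.mp hk).symm
                have hmax : max i (max j k) = (p : Int) := by rw [hkk] at hkp; exact hkp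
                have ht : (i + j + k, i, j, k, nm) ∈ doneAt a0 a1 a2 p :=
                  (mem_doneAt_iff a0 a1 a2 p _).mpr ⟨nm, i, j, k, h0, h1', h2, hmax, rfl⟩
                rw [hd] at ht
                exact absurd ht (List.not_mem_nil)
        push_cast
        omega
      have harith : ((p + 1 : Nat) : Int) + (q' : Int) = Nval a0 a1 a2 := by
        push_cast at hpq ⊢; omega
      have := ih (p + 1) harith hlow'
      rw [show ((p : Int) + 1) = ((p + 1 : Nat) : Int) by push_cast; ring]
      exact this
    · rw [if_neg hd]
      cases hm : PySem.List.min? (doneAt a0 a1 a2 p) (fun t => t.1) with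
      | none => exact absurd ((PySem.List.min?_eq_none_iff _ _).mp hm) hd
      | some m =>
        have hmem := PySem.List.min?_mem hm
        have hmin := PySem.List.min?_isMin hm
        obtain ⟨nm, i, j, k, hi, hj, hk, hmax, hmt⟩ :=
          (mem_doneAt_iff a0 a1 a2 p m).mp hmem
        subst hmt
        constructor
        · intro hc; exact absurd hc (by simp)
        · intro c hc
          have hc' : c = (i, j, k, nm) := (Option.some_inj.mp hc).symm
          subst hc'
          refine ⟨nm, ?_, ?_⟩
          · unfold val?; rw [hi, hj, hk]
          · intro nm' kk' hk'
            have hklow := hlow nm' kk' hk'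
            have hk1 : k1fn (i, j, k, nm) = (p : Int) := hmax
            have hk2 : k2fn (i, j, k, nm) = i + j + k := rfl
            by_cases hkp : kk'.1 = (p : Int)
            · -- nm' also completes at p: its sum is ≥ the minimal sum
              unfold pvKey at hk'
              cases h0 : firstIdx? a0 0 nm' with
              | none => rw [h0] at hk'; simp at hk'
              | some i' =>
                cases h1' : firstIdx? a1 0 nm' with
                | none => rw [h0, h1'] at hk'; simp at hk'
                | some j' =>
                  cases h2 : firstIdx? a2 0 nm' with
                  | none => rw [h0, h1', h2] at hk'; simp at hk'
                  | some k' =>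
                    rw [h0, h1', h2] at hk'
                    have hkk : kk' = (max i' (max j' k'), i' + j' + k') :=
                      (Option.some_inj.mp hk').symm
                    have hmax' : max i' (max j' k') = (p : Int) := by
                      rw [hkk] at hkp; exact hkp
                    have ht : (i' + j' + k', i', j', k', nm') ∈ doneAt a0 a1 a2 p :=
                      (mem_doneAt_iff a0 a1 a2 p _).mpr
                        ⟨nm', i', j', k', h0, h1', h2, hmax', rfl⟩
                    have hsum := hmin _ ht
                    simp only at hsum
                    intro hlt
                    rcases hlt with h | ⟨_, h⟩
                    · rw [hkp] at h; rw [hk1] at h; omega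
                    · rw [hkk] at h; simp only [hk2] at h; omega
            · intro hlt
              rcases hlt with h | ⟨h, _⟩
              · rw [hk1] at h; omega
              · rw [hk1] at h; exact hkp h

-- B's port as the sweep from position 0 (definitional)
theorem B_eq (a0 a1 a2 : List String) :
    find_resync3_alt a0 a1 a2 =
      sweep a0 a1 a2 (PySem.List.pyRange 0 (Nval a0 a1 a2) 1)
        (dictA (a0.take 0)) (dictA (a1.take 0)) (dictA (a2.take 0)) := rfl

-- specialization of sweep_go to the whole range
theorem sweep_spec (a0 a1 a2 : List String) :
    (find_resync3_alt a0 a1 a2 = none → ∀ nm, pvKey a0 a1 a2 nm = none) ∧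
    (∀ c, find_resync3_alt a0 a1 a2 = some c →
      ∃ nm, val? a0 a1 a2 nm = some c ∧
        ∀ nm' kk', pvKey a0 a1 a2 nm' = some kk' → ¬ lexlt kk' (k1fn c, k2fn c)) := by
  have hN : 0 ≤ Nval a0 a1 a2 := by
    unfold Nval
    have : (0 : Int) ≤ (a0.length : Int) := by positivity
    omega
  have harith : ((0 : Nat) : Int) + ((Nval a0 a1 a2).toNat : Int) = Nval a0 a1 a2 := by
    rw [Int.toNat_of_nonneg hN]; ring
  have hlow : ∀ nm kk, pvKey a0 a1 a2 nm = some kk → ((0 : Nat) : Int) ≤ kk.1 := by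
    intro nm kk hk
    have := (pvKey_bounds a0 a1 a2 nm kk hk).1
    push_cast
    omega
  have h := sweep_go a0 a1 a2 (Nval a0 a1 a2).toNat 0 harith hlow
  rw [B_eq a0 a1 a2]
  exact_mod_cast h

-- A-side: the membership characterizations and the scan's key-minimality

theorem mem_commonA (a0 a1 a2 : List String) (nm : String) :
    nm ∈ commonA a0 a1 a2 ↔ (val? a0 a1 a2 nm).isSome := by
  unfold commonA val?
  rw [PySem.Set.mem_inter, PySem.Set.mem_inter]
  have h : ∀ xs : List String,
      nm ∈ PySem.Set.ofList (dictA xs).keys ↔ (firstIdx? xs 0 nm).isSome := by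
    intro xs
    rw [PySem.Set.mem_ofList]
    constructor
    · intro hmem
      by_contra hns
      have he : (dictA xs).get? nm = none := by
        cases he : (dictA xs).get? nm with
        | none => rfl
        | some v => rw [dictA_get?] at he; rw [he] at hns; simp at hns
      exact ((PySem.Dict.get?_eq_none_iff_not_mem_keys _ _).mp he) hmem
    · intro hs
      obtain ⟨v, hv⟩ := Option.isSome_iff_exists.mp hs
      by_contra hmem
      have he := (PySem.Dict.get?_eq_none_iff_not_mem_keys _ _).mpr hmem
      rw [dictA_get?, hv] at he; simp at he
  rw [h a0, h a1, h a2]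
  cases h0 : firstIdx? a0 0 nm <;> cases h1 : firstIdx? a1 0 nm <;>
    cases h2 : firstIdx? a2 0 nm <;> simp

-- the value and key A computes for a common name agree with val? / pvKey
theorem gvA_eq (a0 a1 a2 : List String) (nm : String) (c : Int × Int × Int × String)
    (h : val? a0 a1 a2 nm = some c) :
    gvA a0 a1 a2 nm = c ∧ gkA a0 a1 a2 nm = (k1fn c, k2fn c) ∧
      pvKey a0 a1 a2 nm = some (k1fn c, k2fn c) := by
  unfold val? at h
  cases h0 : firstIdx? a0 0 nm with
  | none => rw [h0] at h; simp at h
  | some i =>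
    cases h1 : firstIdx? a1 0 nm with
    | none => rw [h0, h1] at h; simp at h
    | some j =>
      cases h2 : firstIdx? a2 0 nm with
      | none => rw [h0, h1, h2] at h; simp at h
      | some k =>
        rw [h0, h1, h2] at h
        have hc : c = (i, j, k, nm) := (Option.some_inj.mp h).symm
        subst hc
        have g0 : (dictA a0).getD nm 0 = i := by
          rw [PySem.Dict.getD_eq_get?_getD, dictA_get?, h0]; rfl
        have g1 : (dictA a1).getD nm 0 = j := by
          rw [PySem.Dict.getD_eq_get?_getD, dictA_get?, h1]; rfl
        have g2 : (dictA a2).getD nm 0 = k := by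
          rw [PySem.Dict.getD_eq_get?_getD, dictA_get?, h2]; rfl
        refine ⟨?_, ?_, ?_⟩
        · unfold gvA; rw [g0, g1, g2]
        · unfold gkA k1fn k2fn; rw [g0, g1, g2]
        · unfold pvKey k1fn k2fn; rw [h0, h1, h2]

theorem scan_go (a0 a1 a2 : List String) (l : List String)
    (b : (Int × Int × Int × String) × (Int × Int)) :
    ∃ m, l.foldl (stepScan a0 a1 a2) (some b) = some m ∧
      (m = b ∨ ∃ nm ∈ l, m = (gvA a0 a1 a2 nm, gkA a0 a1 a2 nm)) ∧
      ¬ lexlt b.2 m.2 ∧ ∀ nm ∈ l, ¬ lexlt (gkA a0 a1 a2 nm) m.2 := by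
  induction l generalizing b with
  | nil => exact ⟨b, rfl, Or.inl rfl, lexlt_irrefl b.2, by simp⟩
  | cons x t ih =>
    obtain ⟨b1, b2⟩ := b
    rw [List.foldl_cons]
    by_cases hx : lexlt (gkA a0 a1 a2 x) b2
    · have hs : stepScan a0 a1 a2 (some (b1, b2)) x
          = some (gvA a0 a1 a2 x, gkA a0 a1 a2 x) := by
        have hx' : (gkA a0 a1 a2 x).1 < b2.1 ∨
            ((gkA a0 a1 a2 x).1 = b2.1 ∧ (gkA a0 a1 a2 x).2 < b2.2) := hx
        simp only [stepScan]; rw [if_pos hx']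
      rw [hs]
      obtain ⟨m, hm, hmem, hle, hall⟩ := ih (gvA a0 a1 a2 x, gkA a0 a1 a2 x)
      refine ⟨m, hm, ?_, ?_, ?_⟩
      · rcases hmem with h | ⟨nm, hnm, h⟩
        · exact Or.inr ⟨x, List.mem_cons_self, h⟩
        · exact Or.inr ⟨nm, List.mem_cons_of_mem _ hnm, h⟩
      · exact fun hlt => hle (lexlt_trans hx hlt)
      · intro nm hnm
        rcases List.mem_cons.mp hnm with rfl | hnm
        · exact hle
        · exact hall nm hnm
    · have hs : stepScan a0 a1 a2 (some (b1, b2)) x = some (b1, b2) := by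
        have hx' : ¬ ((gkA a0 a1 a2 x).1 < b2.1 ∨
            ((gkA a0 a1 a2 x).1 = b2.1 ∧ (gkA a0 a1 a2 x).2 < b2.2)) := hx
        simp only [stepScan]; rw [if_neg hx']
      rw [hs]
      obtain ⟨m, hm, hmem, hle, hall⟩ := ih (b1, b2)
      refine ⟨m, hm, ?_, hle, ?_⟩
      · rcases hmem with h | ⟨nm, hnm, h⟩
        · exact Or.inl h
        · exact Or.inr ⟨nm, List.mem_cons_of_mem _ hnm, h⟩
      · intro nm hnm
        rcases List.mem_cons.mp hnm with rfl | hnm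
        · exact fun hlt => hle (lexlt_resolve hx hlt)
        · exact hall nm hnm

-- ===== VERDICT (by name: the statement is the Claim_ definition above) =====
theorem find_resync3_spec : Claim_equal_find_resync3 := by
  intro a0 a1 a2 _ hpre
  unfold Spec_find_resync3
  obtain ⟨hBnone, hBsome⟩ := sweep_spec a0 a1 a2
  cases hr : find_resync3_alt a0 a1 a2 with
  | none =>
    -- no common name: A returns none too
    have hkeys := hBnone hr
    have hc : commonA a0 a1 a2 = [] := by
      rw [List.eq_nil_iff_forall_not_mem]
      intro nm hnm
      have hs := (mem_commonA a0 a1 a2 nm).mp hnm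
      obtain ⟨c, hcv⟩ := Option.isSome_iff_exists.mp hs
      have := (gvA_eq a0 a1 a2 nm c hcv).2.2
      rw [hkeys nm] at this
      exact absurd this (by simp)
    rw [A_eq, if_pos hc]
  | some cB =>
    obtain ⟨nmB, hvB, hminB⟩ := hBsome cB hr
    -- A's scan over the nonempty common set
    have hnmBcom : nmB ∈ commonA a0 a1 a2 :=
      (mem_commonA a0 a1 a2 nmB).mpr (by rw [hvB]; rfl)
    have hcomne : commonA a0 a1 a2 ≠ [] := by
      intro h; rw [h] at hnmBcom; exact List.not_mem_nil hnmBcom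
    rw [A_eq, if_neg hcomne]
    obtain ⟨x, rest, hcom⟩ := List.exists_cons_of_ne_nil hcomne
    have hAfold : (commonA a0 a1 a2).foldl (stepScan a0 a1 a2) none
        = rest.foldl (stepScan a0 a1 a2) (some (gvA a0 a1 a2 x, gkA a0 a1 a2 x)) := by
      rw [hcom, List.foldl_cons]; rfl
    obtain ⟨mA, hmA, hmemA, hleA, hallA⟩ :=
      scan_go a0 a1 a2 rest (gvA a0 a1 a2 x, gkA a0 a1 a2 x)
    have hsrcA : ∃ nm ∈ commonA a0 a1 a2, mA = (gvA a0 a1 a2 nm, gkA a0 a1 a2 nm) := by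
      rcases hmemA with h | ⟨nm, hnm, h⟩
      · exact ⟨x, by rw [hcom]; exact List.mem_cons_self, h⟩
      · exact ⟨nm, by rw [hcom]; exact List.mem_cons_of_mem _ hnm, h⟩
    have hminA : ∀ nm ∈ commonA a0 a1 a2, ¬ lexlt (gkA a0 a1 a2 nm) mA.2 := by
      intro nm hnm
      rw [hcom] at hnm
      rcases List.mem_cons.mp hnm with rfl | hnm
      · exact hleA
      · exact hallA nm hnm
    obtain ⟨nmA, hnmA, hmAeq⟩ := hsrcA
    have hvAs := (mem_commonA a0 a1 a2 nmA).mp hnmA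
    obtain ⟨cA, hcA⟩ := Option.isSome_iff_exists.mp hvAs
    obtain ⟨hgvA, hgkA, hpkA⟩ := gvA_eq a0 a1 a2 nmA cA hcA
    obtain ⟨hgvB, hgkB, hpkB⟩ := gvA_eq a0 a1 a2 nmB cB hvB
    -- keys of the two winners are mutually non-less, hence equal
    have h1 : ¬ lexlt (k1fn cB, k2fn cB) (k1fn cA, k2fn cA) := by
      have hh := hminA nmB hnmBcom
      rw [hmAeq, hgkB] at hh
      rw [show ((gvA a0 a1 a2 nmA, gkA a0 a1 a2 nmA) :
          (Int × Int × Int × String) × (Int × Int)).2 = gkA a0 a1 a2 nmA from rfl, hgkA] at hh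
      exact hh
    have h2 : ¬ lexlt (k1fn cA, k2fn cA) (k1fn cB, k2fn cB) :=
      hminB nmA (k1fn cA, k2fn cA) hpkA
    have hkeq : ((k1fn cA, k2fn cA) : Int × Int) = (k1fn cB, k2fn cB) :=
      lexlt_antisymm h2 h1
    -- Pre_ forces the two names to coincide
    have hsameName : nmA = nmB := by
      by_contra hne
      have hocc0A : (firstIdx? a0 0 nmA).isSome := by
        unfold val? at hcA
        cases hf : firstIdx? a0 0 nmA with
        | none => rw [hf] at hcA; simp at hcA
        | some i => rfl
      have hocc0B : (firstIdx? a0 0 nmB).isSome := by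
        unfold val? at hvB
        cases hf : firstIdx? a0 0 nmB with
        | none => rw [hf] at hvB; simp at hvB
        | some i => rfl
      obtain ⟨lA, hlA, hbA⟩ := firstIdx?_occurs a0 0 nmA hocc0A
      obtain ⟨lB, hlB, hbB⟩ := firstIdx?_occurs a0 0 nmB hocc0B
      have hkk : pvKey a0 a1 a2 (qname_base_of lA) = pvKey a0 a1 a2 (qname_base_of lB) := by
        rw [hbA, hbB, hpkA, hpkB, hkeq]
      have hz := hpre lA hlA lB hlB (by rw [hbA, hbB]; exact hne) hkk
      rw [hbA, hpkA] at hz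
      simp at hz
    have hcAeq : cA = cB := by
      rw [hsameName] at hcA
      exact Option.some_inj.mp (hcA.symm.trans hvB)
    -- conclude
    rw [hAfold, hmA, hmAeq]
    show some (gvA a0 a1 a2 nmA) = some cB
    rw [hgvA, hcAeq]
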